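-- pv_equiv track=rewrite | github.com/NicoJornet/trading-bot | 01_noyau_runtime_obligatoire/apex_v31_optimized_production.py | has_group_duplicates
-- ===== SOURCE A (Python) =====
-- from typing import Dict, List, Tuple, Optional
--
-- def has_group_duplicates(selected: List[str], group_map: Dict[str, int]) -> bool:
--     seen: set[int] = set()
--     for ticker in selected:
--         group_id = group_map.get(ticker)
--         if group_id is None:
--             continue
--         if group_id in seen:
--             return True
--         seen.add(group_id)
--     return False
-- ===== SOURCE B (Python) =====
-- from typing import Dict, List
--
--
-- def has_group_duplicates(selected: List[str], group_map: Dict[str, int]) -> bool: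
--     ids = sorted(g for t in selected if (g := group_map.get(t)) is not None)
--     return any(x == y for x, y in zip(ids, ids[1:]))
-- ===== Notes on version B (the rewrite author's own statement) =====
-- stated objective: alternative
-- what changed: Instead of an incremental seen-set with early exit, B collects the mapped group ids, sorts them, and reports a duplicate iff two adjacent sorted ids are equal.
import Mathlib
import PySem

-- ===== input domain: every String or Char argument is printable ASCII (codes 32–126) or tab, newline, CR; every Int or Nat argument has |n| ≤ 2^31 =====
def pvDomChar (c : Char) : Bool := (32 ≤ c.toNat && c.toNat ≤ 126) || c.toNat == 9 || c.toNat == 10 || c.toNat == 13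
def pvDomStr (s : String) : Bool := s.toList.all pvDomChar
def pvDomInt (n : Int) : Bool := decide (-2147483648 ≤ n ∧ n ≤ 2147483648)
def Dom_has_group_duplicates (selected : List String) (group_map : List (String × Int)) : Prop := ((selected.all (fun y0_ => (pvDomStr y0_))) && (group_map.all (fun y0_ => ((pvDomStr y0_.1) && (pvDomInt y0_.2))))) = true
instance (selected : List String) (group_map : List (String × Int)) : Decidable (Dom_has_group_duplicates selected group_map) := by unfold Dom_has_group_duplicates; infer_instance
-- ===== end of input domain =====

-- B replaces A's incremental seen-set loop (early return on a repeat) by sorting the mapped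
-- group ids and checking whether any two adjacent sorted ids are equal (alternative algorithm).


-- ===== PORT A =====
-- the for-loop with its 'seen' set and early 'return True'
def hgdLoopA (group_map : List (String × Int)) : List String → PySem.Set Int → Bool
  | [], _ => false
  | ticker :: rest, seen =>
    match (PySem.Dict.mk group_map).get? ticker with
    | none => hgdLoopA group_map rest seen                  -- group_id is None: continue
    | some group_id =>
      if PySem.Set.contains seen group_id then true         -- group_id in seen: return True
      else hgdLoopA group_map rest (PySem.Set.add seen group_id)

def has_group_duplicates (selected : List String) (group_map : List (String × Int)) : Bool :=
  hgdLoopA group_map selected PySem.Set.empty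

-- ===== PORT B =====
def has_group_duplicates_alt (selected : List String) (group_map : List (String × Int)) : Bool :=
  let ids := PySem.List.sorted
    (selected.filterMap (fun t => (PySem.Dict.mk group_map).get? t)) (fun x => x) false
  (ids.zip ids.tail).any (fun p => p.1 == p.2)

-- ===== PRECONDITION & SPEC =====
def Spec_has_group_duplicates (selected : List String) (group_map : List (String × Int)) (out : Bool) : Prop := out = has_group_duplicates_alt selected group_map
instance (selected : List String) (group_map : List (String × Int)) (out : Bool) : Decidable (Spec_has_group_duplicates selected group_map out) := by unfold Spec_has_group_duplicates; infer_instance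

-- ===== CLAIM (what is proved, stated in full; the proofs are below) =====
def Claim_equal_has_group_duplicates : Prop := ∀ (selected : List String) (group_map : List (String × Int)), Dom_has_group_duplicates selected group_map → Spec_has_group_duplicates selected group_map (has_group_duplicates selected group_map)

-- ===== LEMMAS AND PROOFS =====

-- A's loop from a duplicate-free 'seen' answers: does seen ++ remaining ids contain a repeat?
theorem hgdLoopA_eq (group_map : List (String × Int)) (sel : List String) (seen : PySem.Set Int)
    (hn : List.Nodup seen) :
    hgdLoopA group_map sel seen
      = !decide ((seen ++ sel.filterMap (fun t => (PySem.Dict.mk group_map).get? t)).Nodup) := by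
  induction sel generalizing seen with
  | nil => simp [hgdLoopA, hn]
  | cons t rest ih =>
    cases hg : (PySem.Dict.mk group_map).get? t with
    | none => simp only [hgdLoopA, List.filterMap_cons, hg]; exact ih seen hn
    | some g =>
      simp only [hgdLoopA, List.filterMap_cons, hg]
      by_cases hmem : g ∈ seen
      · have : ¬ (seen ++ g :: rest.filterMap (fun t => (PySem.Dict.mk group_map).get? t)).Nodup := by
          intro hnd
          exact (List.disjoint_of_nodup_append hnd) hmem (List.mem_cons_self ..)
        simp [PySem.Set.contains, hmem, this]
      · have hadd : PySem.Set.add seen g = seen ++ [g] := by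
          simp [PySem.Set.add, PySem.Set.contains, hmem]
        have hn' : List.Nodup (PySem.Set.add seen g) := by
          rw [hadd]
          exact List.Nodup.append hn (List.nodup_singleton g)
            (by simpa [List.disjoint_singleton] using hmem)
        rw [if_neg (by simpa [PySem.Set.contains] using hmem), ih _ hn', hadd]
        simp

-- for a ≤-sorted list, an adjacent equal pair exists exactly when the list has a duplicate
theorem adjany_eq_not_nodup (s : List Int) (hs : s.Pairwise (· ≤ ·)) :
    ((s.zip s.tail).any (fun p => p.1 == p.2)) = !decide s.Nodup := by
  induction s with
  | nil => simp
  | cons a t ih =>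
    cases t with
    | nil => simp
    | cons b u =>
      have htl : (b :: u).Pairwise (· ≤ ·) := hs.tail
      have hab : a ≤ b := (List.pairwise_cons.mp hs).1 b (List.mem_cons_self ..)
      by_cases heq : a = b
      · subst heq
        have : ¬ (a :: a :: u).Nodup := by
          intro h; exact (List.pairwise_cons.mp h).1 a (List.mem_cons_self ..) rfl
        simp [this]
      · have hlt : a < b := lt_of_le_of_ne hab heq
        have hnotmem : a ∉ b :: u := by
          intro hm
          rcases List.mem_cons.mp hm with h | h
          · exact heq h
          · have : b ≤ a := (List.pairwise_cons.mp htl).1 a h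
            exact absurd (lt_of_lt_of_le hlt this) (lt_irrefl a)
        have hiff : (a :: b :: u).Nodup ↔ (b :: u).Nodup := by
          constructor
          · exact List.Nodup.of_cons
          · intro h; exact List.nodup_cons.mpr ⟨hnotmem, h⟩
        have := ih htl
        simp only [List.zip_cons_cons, List.tail_cons, List.any_cons] at this ⊢
        rw [this]
        by_cases hnd : (b :: u).Nodup <;> simp [hnd, heq, hiff]

-- ===== VERDICT (by name: the statement is the Claim_ definition above) =====
theorem has_group_duplicates_spec : Claim_equal_has_group_duplicates := by
  intro selected group_map _
  unfold Spec_has_group_duplicates has_group_duplicates has_group_duplicates_alt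
  rw [hgdLoopA_eq group_map selected PySem.Set.empty (by simp [PySem.Set.empty])]
  set ids := selected.filterMap (fun t => (PySem.Dict.mk group_map).get? t) with hids
  have hperm : (PySem.List.sorted ids (fun x => x) false).Perm ids := PySem.List.sorted_perm ..
  have hpw : (PySem.List.sorted ids (fun x => x) false).Pairwise (· ≤ ·) := by
    simpa using PySem.List.sorted_pairwise ids (fun x => x)
  rw [adjany_eq_not_nodup _ hpw]
  simp [PySem.Set.empty, hperm.nodup_iff]
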